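-- pv_equiv track=rewrite | github.com/jacktang/pymor | .ci/create_conda_env.py | _strip_markers
-- ===== SOURCE A (Python) =====
-- def _strip_markers(name):
--     for m in '!;<>=':
--         try:
--             i = name.index(m)
--             name = name[:i].strip()
--         except ValueError:
--             continue
--     return name
-- ===== SOURCE B (Python) =====
-- def _strip_markers(name):
--     for i, c in enumerate(name):
--         if c in '!;<>=':
--             return name[:i].strip()
--     return name
-- ===== Notes on version B (the rewrite author's own statement) =====
-- stated objective: simpler
-- what changed: A loops over the five marker characters, each time re-scanning the (repeatedly truncated and stripped) name with .index inside a try/except; B is a single left-to-right scan over the characters that truncates and strips at the first marker character and returns the name untouched if none occurs.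
import Mathlib
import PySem

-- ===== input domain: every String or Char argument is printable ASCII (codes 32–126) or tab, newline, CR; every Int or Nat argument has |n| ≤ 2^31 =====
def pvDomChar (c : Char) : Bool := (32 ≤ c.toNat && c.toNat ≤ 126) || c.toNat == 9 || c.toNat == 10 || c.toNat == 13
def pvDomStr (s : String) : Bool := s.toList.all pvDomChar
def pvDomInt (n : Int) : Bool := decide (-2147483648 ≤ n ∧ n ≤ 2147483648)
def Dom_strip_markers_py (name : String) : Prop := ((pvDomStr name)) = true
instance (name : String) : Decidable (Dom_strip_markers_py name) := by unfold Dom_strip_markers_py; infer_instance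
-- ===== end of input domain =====

-- B replaces A's per-marker .index/truncate loop by one left-to-right scan that cuts at the
-- first marker character (objective: simpler).

-- ===== PORT A =====
-- the marker characters '!;<>=' iterated over by A (and tested against by B)
def pvMarkers : List Char := ['!', ';', '<', '>', '=']

-- one iteration of A's loop body: name.index(m) succeeds → truncate and strip; ValueError → keep name
def pvStepA (s : List Char) (m : Char) : List Char :=
  match PySem.List.index? s m with
  | some i => PySem.Chars.strip (s.take i)
  | none => s

def strip_markers_py (name : String) : String :=
  String.ofList (pvMarkers.foldl pvStepA name.toList)

-- ===== PORT B =====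
-- B's 'for i, c in enumerate(name)' scan: at the first marker return name[:i].strip()
def pvGoB (full : List Char) : Nat → List Char → List Char
  | _, [] => full
  | i, c :: rest =>
      if pvMarkers.contains c then PySem.Chars.strip (full.take i)
      else pvGoB full (i + 1) rest

def strip_markers_py_alt (name : String) : String :=
  String.ofList (pvGoB name.toList 0 name.toList)

-- ===== PRECONDITION & SPEC =====
def Spec_strip_markers_py (name : String) (out : String) : Prop := out = strip_markers_py_alt name
instance (name : String) (out : String) : Decidable (Spec_strip_markers_py name out) := by unfold Spec_strip_markers_py; infer_instance

-- ===== CLAIM (what is proved, stated in full; the proofs are below) =====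
def Claim_equal_strip_markers_py : Prop := ∀ (name : String), Dom_strip_markers_py name → Spec_strip_markers_py name (strip_markers_py name)

-- ===== LEMMAS AND PROOFS =====

-- takeWhile is the whole list when every element passes
lemma pv_takeWhile_all {q : Char → Bool} : ∀ (l : List Char), (∀ c ∈ l, q c = true) → l.takeWhile q = l := by
  intro l h
  induction l with
  | nil => rfl
  | cons c t ih =>
      simp only [List.takeWhile_cons, h c (List.mem_cons_self), if_true]
      rw [ih (fun x hx => h x (List.mem_cons_of_mem _ hx))]

lemma pv_takeWhile_congr {p q : Char → Bool} : ∀ (l : List Char), (∀ c ∈ l, p c = q c) → l.takeWhile p = l.takeWhile q := by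
  intro l h
  induction l with
  | nil => rfl
  | cons c t ih =>
      simp only [List.takeWhile_cons, h c (List.mem_cons_self)]
      cases hq : q c with
      | false => simp
      | true => simp only [if_true]; rw [ih (fun x hx => h x (List.mem_cons_of_mem _ hx))]

lemma pv_any_congr {p q : Char → Bool} : ∀ (l : List Char), (∀ c ∈ l, p c = q c) → l.any p = l.any q := by
  intro l h
  induction l with
  | nil => rfl
  | cons c t ih =>
      simp only [List.any_cons, h c (List.mem_cons_self)]
      rw [ih (fun x hx => h x (List.mem_cons_of_mem _ hx))]

-- stripping whitespace never removes a non-whitespace character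
lemma pv_mem_dropWhile_ws {c : Char} {l : List Char} (hc : PySem.Chars.isspace c = false)
    (h : c ∈ l) : c ∈ List.dropWhile PySem.Chars.isspace l := by
  have := List.takeWhile_append_dropWhile (p := PySem.Chars.isspace) (l := l)
  rw [← this] at h
  rcases List.mem_append.mp h with h' | h'
  · exact absurd (List.mem_takeWhile_imp h') (by simp [hc])
  · exact h'

lemma pv_mem_strip {c : Char} {l : List Char} (hc : PySem.Chars.isspace c = false)
    (h : c ∈ l) : c ∈ PySem.Chars.strip l := by
  unfold PySem.Chars.strip PySem.Chars.lstrip PySem.Chars.rstrip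
  have h1 : c ∈ List.dropWhile PySem.Chars.isspace l := pv_mem_dropWhile_ws hc h
  have h2 : c ∈ (List.dropWhile PySem.Chars.isspace l).reverse := List.mem_reverse.mpr h1
  exact List.mem_reverse.mpr (pv_mem_dropWhile_ws hc h2)

-- appending trailing whitespace does not change rstrip / strip
lemma pv_rstrip_append_ws (t z : List Char) (hz : ∀ c ∈ z, PySem.Chars.isspace c = true) :
    PySem.Chars.rstrip (t ++ z) = PySem.Chars.rstrip t := by
  unfold PySem.Chars.rstrip
  rw [List.reverse_append, List.dropWhile_append]
  have hzr : List.dropWhile PySem.Chars.isspace z.reverse = [] := by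
    rw [List.dropWhile_eq_nil_iff]
    intro x hx
    exact hz x (List.mem_reverse.mp (by simpa using hx))
  simp [hzr]

lemma pv_strip_append_ws (t z : List Char) (hz : ∀ c ∈ z, PySem.Chars.isspace c = true) :
    PySem.Chars.strip (t ++ z) = PySem.Chars.strip t := by
  unfold PySem.Chars.strip PySem.Chars.lstrip
  rw [List.dropWhile_append]
  by_cases h : (List.dropWhile PySem.Chars.isspace t).isEmpty = true
  · have hz' : List.dropWhile PySem.Chars.isspace z = [] := by
      rw [List.dropWhile_eq_nil_iff]; intro x hx; exact hz x hx
    have ht : List.dropWhile PySem.Chars.isspace t = [] := by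
      simpa [List.isEmpty_iff] using h
    simp [hz', ht]
  · rw [if_neg h]
    exact pv_rstrip_append_ws _ _ hz

lemma pv_strip_ws_append (w t : List Char) (hw : ∀ c ∈ w, PySem.Chars.isspace c = true) :
    PySem.Chars.strip (w ++ t) = PySem.Chars.strip t := by
  unfold PySem.Chars.strip PySem.Chars.lstrip
  rw [List.dropWhile_append]
  have hw' : List.dropWhile PySem.Chars.isspace w = [] := by
    rw [List.dropWhile_eq_nil_iff]; intro x hx; exact hw x hx
  simp [hw']

-- the key strip/takeWhile interchange: stripping first does not change the final stripped prefix,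
-- provided the cut predicate keeps every whitespace character
lemma pv_sts (q : Char → Bool) (hq : ∀ c, PySem.Chars.isspace c = true → q c = true) (l : List Char) :
    PySem.Chars.strip ((PySem.Chars.strip l).takeWhile q) = PySem.Chars.strip (l.takeWhile q) := by
  set w := l.takeWhile PySem.Chars.isspace with hwdef
  set r := l.dropWhile PySem.Chars.isspace with hrdef
  have hl : w ++ r = l := List.takeWhile_append_dropWhile
  have hw : ∀ c ∈ w, PySem.Chars.isspace c = true := fun c hc => List.mem_takeWhile_imp hc
  -- RHS = strip (takeWhile q r)
  have hrhs : PySem.Chars.strip (l.takeWhile q) = PySem.Chars.strip (r.takeWhile q) := by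
    conv_lhs => rw [← hl]
    rw [List.takeWhile_append]
    have hqw : w.takeWhile q = w := pv_takeWhile_all w (fun c hc => hq c (hw c hc))
    rw [hqw, if_pos rfl]
    exact pv_strip_ws_append w _ hw
  -- strip l = rstrip r
  have hstrip : PySem.Chars.strip l = PySem.Chars.rstrip r := by
    unfold PySem.Chars.strip PySem.Chars.lstrip
    rw [← hrdef]
  -- r = t ++ z with t = rstrip r and z trailing whitespace
  set t := PySem.Chars.rstrip r with htdef
  set z := (r.reverse.takeWhile PySem.Chars.isspace).reverse with hzdef
  have hr : r = t ++ z := by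
    have := List.takeWhile_append_dropWhile (p := PySem.Chars.isspace) (l := r.reverse)
    have h2 : r = ((r.reverse.takeWhile PySem.Chars.isspace) ++ (r.reverse.dropWhile PySem.Chars.isspace)).reverse := by
      rw [this]; simp
    rw [List.reverse_append] at h2
    rw [htdef, hzdef]
    unfold PySem.Chars.rstrip
    exact h2
  have hz : ∀ c ∈ z, PySem.Chars.isspace c = true := by
    intro c hc
    exact List.mem_takeWhile_imp (List.mem_reverse.mp (by simpa [hzdef] using hc))
  rw [hstrip, hrhs]
  conv_rhs => rw [hr]
  rw [List.takeWhile_append]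
  by_cases hlen : (t.takeWhile q).length = t.length
  · rw [if_pos hlen]
    have ht : t.takeWhile q = t := (List.takeWhile_prefix q).eq_of_length hlen
    rw [ht]
    have hzq : ∀ c ∈ z.takeWhile q, PySem.Chars.isspace c = true := by
      intro c hc
      exact hz c ((List.takeWhile_prefix q).subset hc)
    rw [pv_strip_append_ws t _ hzq]
  · rw [if_neg hlen]

-- markers are never whitespace
lemma pv_not_space_of_mem {ms : List Char} (hms : ∀ c ∈ ms, PySem.Chars.isspace c = false)
    {c : Char} (hc : ms.contains c = true) : PySem.Chars.isspace c = false :=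
  hms c (by simpa using hc)

-- characterization of A's fold: truncate at the leftmost occurrence of any marker, then strip
lemma pv_foldA_spec : ∀ (ms : List Char), (∀ c ∈ ms, PySem.Chars.isspace c = false) →
    ∀ (s : List Char),
    List.foldl pvStepA s ms =
      if s.any (fun c => ms.contains c) then
        PySem.Chars.strip (s.takeWhile (fun c => !ms.contains c)) else s := by
  intro ms
  induction ms with
  | nil => intro _ s; simp
  | cons m ms ih =>
      intro hms s
      have hmsTail : ∀ c ∈ ms, PySem.Chars.isspace c = false :=
        fun c hc => hms c (List.mem_cons_of_mem _ hc)
      rw [List.foldl_cons]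
      cases h : PySem.List.index? s m with
      | none =>
          have hm : m ∉ s := (PySem.List.index?_eq_none_iff s m).mp h
          have hstep : pvStepA s m = s := by unfold pvStepA; rw [h]
          rw [hstep, ih hmsTail]
          have hcongr : ∀ c ∈ s, (ms.contains c : Bool) = ((m :: ms).contains c : Bool) := by
            intro c hc
            have hne : (c == m) = false := by
              simp only [beq_eq_false_iff_ne]
              intro hcm; exact hm (hcm ▸ hc)
            simp only [List.contains_cons, hne, Bool.false_or]
          rw [pv_any_congr s hcongr,
              pv_takeWhile_congr s (fun c hc => by rw [hcongr c hc])]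
      | some i =>
          have hstep : pvStepA s m = PySem.Chars.strip (s.take i) := by
            unfold pvStepA; rw [h]
          obtain ⟨pre, suf, hs, hlen, hpre⟩ := (PySem.List.index?_eq_some_iff _ m i).mp h
          subst hs
          have htake : (pre ++ m :: suf).take i = pre := by
            rw [← hlen]; exact List.take_left
          rw [hstep, ih hmsTail, htake]
          -- the outer condition holds: m occurs
          have hany : (pre ++ m :: suf).any (fun c => (m :: ms).contains c) = true := by
            refine List.any_eq_true.mpr ⟨m, by simp, ?_⟩
            simp
          rw [hany, if_pos rfl]
          -- RHS takeWhile stops at m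
          have hqm : (!(m :: ms).contains m) = false := by simp
          have hRHS : (pre ++ m :: suf).takeWhile (fun c => !(m :: ms).contains c) =
              pre.takeWhile (fun c => !(m :: ms).contains c) := by
            rw [List.takeWhile_append]
            by_cases hl : (pre.takeWhile (fun c => !(m :: ms).contains c)).length = pre.length
            · rw [if_pos hl]
              have hp : pre.takeWhile (fun c => !(m :: ms).contains c) = pre :=
                (List.takeWhile_prefix _).eq_of_length hl
              rw [List.takeWhile_cons, hqm]
              simpa using hp.symm
            · rw [if_neg hl]
          have hcongrPre : ∀ c ∈ pre, (!(m :: ms).contains c : Bool) = (!ms.contains c : Bool) := by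
            intro c hc
            have hne : (c == m) = false := by
              simp only [beq_eq_false_iff_ne]
              intro hcm; exact hpre (hcm ▸ hc)
            simp only [List.contains_cons, hne, Bool.false_or]
          rw [hRHS, pv_takeWhile_congr pre hcongrPre]
          by_cases hA : (PySem.Chars.strip pre).any (fun c => ms.contains c) = true
          · rw [if_pos hA]
            exact pv_sts _ (fun c hsp => by
              cases hqc : (!ms.contains c : Bool) with
              | true => rfl
              | false =>
                  exfalso
                  have : ms.contains c = true := by simpa using hqc
                  exact absurd hsp (by simp [pv_not_space_of_mem hmsTail this])) pre
          · rw [if_neg hA]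
            have hall : ∀ c ∈ pre, (!ms.contains c : Bool) = true := by
              intro c hc
              cases hqc : (ms.contains c : Bool) with
              | false => simp
              | true =>
                  exfalso
                  apply hA
                  exact List.any_eq_true.mpr
                    ⟨c, pv_mem_strip (pv_not_space_of_mem hmsTail hqc) hc, hqc⟩
            rw [pv_takeWhile_all pre hall]

-- characterization of B's scan
lemma pv_goB_spec : ∀ (rest : List Char) (i : Nat) (full : List Char),
    full.take i ++ rest = full →
    (∀ c ∈ full.take i, pvMarkers.contains c = false) →
    pvGoB full i rest =
      if rest.any (fun c => pvMarkers.contains c) then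
        PySem.Chars.strip (full.takeWhile (fun c => !pvMarkers.contains c)) else full := by
  intro rest
  induction rest with
  | nil => intro i full _ _; simp [pvGoB]
  | cons c rest ih =>
      intro i full hpre hfree
      have hdrop : full.drop i = c :: rest := by
        have h1 : full.take i ++ full.drop i = full := List.take_append_drop i full
        have := hpre.trans h1.symm
        exact (List.append_cancel_left this).symm
      by_cases hc : pvMarkers.contains c = true
      · simp only [pvGoB, hc, if_true]
        have hany : (c :: rest).any (fun c => pvMarkers.contains c) = true :=
          List.any_eq_true.mpr ⟨c, List.mem_cons_self, hc⟩
        rw [hany, if_pos rfl]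
        -- takeWhile over full = take i full
        have hfull : full.takeWhile (fun c => !pvMarkers.contains c) = full.take i := by
          conv_lhs => rw [← hpre]
          rw [List.takeWhile_append]
          have hall : (full.take i).takeWhile (fun c => !pvMarkers.contains c) = full.take i :=
            pv_takeWhile_all _ (fun x hx => by simpa using hfree x hx)
          rw [hall, if_pos rfl, List.takeWhile_cons]
          have hcm : c ∈ pvMarkers := by simpa using hc
          simp [hcm]
        rw [hfull]
      · have hc' : pvMarkers.contains c = false := by simpa using hc
        have hcm : c ∉ pvMarkers := by simpa using hc'
        have hstep : pvGoB full i (c :: rest) = pvGoB full (i + 1) rest := by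
          simp [pvGoB, hcm]
        rw [hstep]
        have htake1 : full.take (i + 1) = full.take i ++ [c] := by
          rw [List.take_add, hdrop]; rfl
        have hpre' : full.take (i + 1) ++ rest = full := by
          rw [htake1, List.append_assoc]
          simpa using hpre
        have hfree' : ∀ x ∈ full.take (i + 1), pvMarkers.contains x = false := by
          intro x hx
          rw [htake1] at hx
          rcases List.mem_append.mp hx with h | h
          · exact hfree x h
          · have := List.mem_singleton.mp h
            subst this; exact hc'
        rw [ih (i + 1) full hpre' hfree']
        have : (c :: rest).any (fun c => pvMarkers.contains c) =
            rest.any (fun c => pvMarkers.contains c) := by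
          simp [List.any_cons, hcm]
        rw [this]

-- ===== VERDICT (by name: the statement is the Claim_ definition above) =====
theorem strip_markers_py_spec : Claim_equal_strip_markers_py := by
  unfold Claim_equal_strip_markers_py
  intro name _
  unfold Spec_strip_markers_py strip_markers_py strip_markers_py_alt
  have hms : ∀ c ∈ pvMarkers, PySem.Chars.isspace c = false := by
    intro c hc
    fin_cases hc <;> decide
  rw [pv_foldA_spec pvMarkers hms name.toList,
      pv_goB_spec name.toList 0 name.toList (by simp) (by simp)]
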